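-- pv_equiv track=rewrite | github.com/yean3oh/flask-pythonanywhere | myTools.py | transform_to_transactions
-- ===== SOURCE A (Python) =====
-- def transform_to_transactions(payment_no,product):
--     # parameter = [['1', 'a'],[']]
--     itemsets = []
--     products = []
--     for i in range(len(product)):
--         if i+1 == len(product):
--             products.append(product[i])
--             itemsets.append(products)
--         elif payment_no[i] == payment_no[i+1]:
--             products.append(product[i])
--         else:
--             products.append(product[i])
--             itemsets.append(products)
--             products = []
--     return itemsets
-- ===== SOURCE B (Python) =====
-- def transform_to_transactions(payment_no, product):
--     n = len(product)
--     if n == 0: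
--         return []
--     cuts = [0] + [i + 1 for i in range(n - 1) if payment_no[i] != payment_no[i + 1]] + [n]
--     return [[product[i] for i in range(cuts[j], cuts[j + 1])] for j in range(len(cuts) - 1)]
-- ===== Notes on version B (the rewrite author's own statement) =====
-- stated objective: alternative
-- what changed: Replaced the single grow-and-flush accumulator loop by a two-pass boundary-table decomposition: first compute the list of run-boundary cut indices, then partition product by consecutive cut pairs.
import Mathlib
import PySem

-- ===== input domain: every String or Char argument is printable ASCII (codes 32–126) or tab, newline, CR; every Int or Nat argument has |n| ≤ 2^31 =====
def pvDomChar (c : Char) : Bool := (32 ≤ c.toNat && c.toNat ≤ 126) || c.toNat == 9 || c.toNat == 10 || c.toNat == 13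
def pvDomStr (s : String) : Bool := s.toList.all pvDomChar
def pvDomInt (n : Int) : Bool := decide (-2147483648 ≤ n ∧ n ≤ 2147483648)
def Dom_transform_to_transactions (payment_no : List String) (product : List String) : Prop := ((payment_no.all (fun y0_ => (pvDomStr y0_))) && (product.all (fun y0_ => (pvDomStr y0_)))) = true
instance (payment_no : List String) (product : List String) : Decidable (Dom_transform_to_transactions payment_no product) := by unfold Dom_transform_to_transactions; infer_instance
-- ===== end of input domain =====

-- B replaces A's grow-and-flush accumulator loop by a two-pass boundary-table decomposition (compute run-boundary
-- cut indices, then partition product by consecutive cut pairs); alternative structure, same cost.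

-- ===== PORT A =====
def transform_to_transactions (payment_no : List String) (product : List String) : List (List String) :=
  -- for i in range(len(product)): three branches, state (itemsets, products)
  (((PySem.List.pyRange 0 (PySem.List.len product) 1).foldl
    (fun (st : List (List String) × List String) i =>
      if i + 1 = PySem.List.len product then
        (st.1 ++ [st.2 ++ [PySem.List.pyGetD product i ""]], st.2 ++ [PySem.List.pyGetD product i ""])
      else if PySem.List.pyGetD payment_no i "" == PySem.List.pyGetD payment_no (i + 1) "" then
        (st.1, st.2 ++ [PySem.List.pyGetD product i ""])
      else
        (st.1 ++ [st.2 ++ [PySem.List.pyGetD product i ""]], ([] : List String)))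
    ([], []))).1

-- ===== PORT B =====
def transform_to_transactions_alt (payment_no : List String) (product : List String) : List (List String) :=
  let n : Int := PySem.List.len product
  if n = 0 then []
  else
    let cuts : List Int :=
      [0] ++ ((PySem.List.pyRange 0 (n - 1) 1).filter
                (fun i => !(PySem.List.pyGetD payment_no i "" == PySem.List.pyGetD payment_no (i + 1) ""))).map (· + 1)
          ++ [n]
    (PySem.List.pyRange 0 (PySem.List.len cuts - 1) 1).map
      (fun j => (PySem.List.pyRange (PySem.List.pyGetD cuts j 0) (PySem.List.pyGetD cuts (j + 1) 0) 1).map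
        (fun i => PySem.List.pyGetD product i ""))

-- ===== PRECONDITION & SPEC =====
-- A raises IndexError (payment_no[i+1]) when product has ≥ 2 elements and payment_no is shorter than product; Pre_ excludes exactly those inputs.
def Pre_transform_to_transactions (payment_no : List String) (product : List String) : Prop :=
  product.length ≤ payment_no.length ∨ product.length ≤ 1
instance (payment_no : List String) (product : List String) : Decidable (Pre_transform_to_transactions payment_no product) := by unfold Pre_transform_to_transactions; infer_instance
def pvWitness_transform_to_transactions : List String × List String := (["1", "1", "2"], ["a", "b", "c"])

def Spec_transform_to_transactions (payment_no : List String) (product : List String) (out : List (List String)) : Prop := out = transform_to_transactions_alt payment_no product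
instance (payment_no : List String) (product : List String) (out : List (List String)) : Decidable (Spec_transform_to_transactions payment_no product out) := by unfold Spec_transform_to_transactions; infer_instance

-- ===== CLAIM (what is proved, stated in full; the proofs are below) =====
def Claim_equal_transform_to_transactions : Prop := ∀ (payment_no : List String) (product : List String), Dom_transform_to_transactions payment_no product → Pre_transform_to_transactions payment_no product → Spec_transform_to_transactions payment_no product (transform_to_transactions payment_no product)

-- ===== LEMMAS AND PROOFS =====

-- reference run-grouping recursion; both ports are reduced to it
def grp : List String → List String → List String → List (List String)
  | _acc, _ks, [] => []
  | acc, _ks, [p] => [acc ++ [p]]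
  | acc, ks, p :: p2 :: ps =>
      match ks with
      | k :: k2 :: ks' =>
          if k == k2 then grp (acc ++ [p]) (k2 :: ks') (p2 :: ps)
          else (acc ++ [p]) :: grp [] (k2 :: ks') (p2 :: ps)
      | _ => []
def stepA (ks ps : List String) (st : List (List String) × List String) (j : Nat) : List (List String) × List String :=
  if j + 1 = ps.length then (st.1 ++ [st.2 ++ [ps.getD j ""]], st.2 ++ [ps.getD j ""])
  else if ks.getD j "" == ks.getD (j + 1) "" then (st.1, st.2 ++ [ps.getD j ""])
  else (st.1 ++ [st.2 ++ [ps.getD j ""]], ([] : List String))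
def seg (ps : List String) (a b : Nat) : List String := (List.range (b - a)).map (fun t => ps.getD (a + t) "")

lemma seg_succ (p : String) (ps : List String) (a b : Nat) : seg (p :: ps) (a + 1) (b + 1) = seg ps a b := by
  simp [seg, Nat.add_right_comm]
lemma seg_zero_succ (p : String) (ps : List String) (b : Nat) : seg (p :: ps) 0 (b + 1) = p :: seg ps 0 b := by
  simp [seg, List.range_succ_eq_map, List.map_map, Function.comp_def]
lemma grp_acc : ∀ (ps ks : List String) (p : String) (acc : List String),
    grp acc ks (p :: ps) =
      match grp [] ks (p :: ps) with
      | [] => []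
      | g :: gs => (acc ++ g) :: gs := by
  intro ps
  induction ps with
  | nil => intro ks p acc; simp [grp]
  | cons p2 ps2 ih =>
    intro ks p acc
    match ks with
    | [] => simp [grp]
    | [k] => simp [grp]
    | k :: k2 :: ks' =>
      by_cases h : k == k2
      · rw [grp, grp]
        simp only [h, if_true]
        rw [ih (k2 :: ks') p2 (acc ++ [p]), ih (k2 :: ks') p2 ([] ++ [p])]
        cases grp [] (k2 :: ks') (p2 :: ps2) with
        | nil => rfl
        | cons g gs => simp
      · rw [grp, grp]
        simp only [h]
        simp
lemma stepA_succ (k : String) (ks : List String) (p : String) (ps : List String) (st : List (List String) × List String) (j : Nat) :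
    stepA (k :: ks) (p :: ps) st (j + 1) = stepA ks ps st j := by
  simp [stepA]
lemma loopA : ∀ (ps2 ks : List String) (p2 p : String), ps2.length + 2 ≤ ks.length →
    ∀ (its : List (List String)) (acc : List String),
    ((List.range (ps2.length + 2)).foldl (stepA ks (p :: p2 :: ps2)) (its, acc)).1 =
      its ++ grp acc ks (p :: p2 :: ps2) := by
  intro ps2
  induction ps2 with
  | nil =>
    intro ks p2 p h its acc
    match ks, h with
    | k :: k2 :: ks', _ =>
      show ((List.range 2).foldl (stepA (k :: k2 :: ks') [p, p2]) (its, acc)).1 = _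
      by_cases hk : k == k2 <;>
        simp [List.range_succ, stepA, grp, hk]
  | cons p3 ps3 ih =>
    intro ks p2 p h its acc
    match ks, h with
    | k :: k2 :: ks', h =>
      have hr : List.range ((p3 :: ps3).length + 2) = 0 :: (List.range (ps3.length + 2)).map (· + 1) := by
        have h3 : (p3 :: ps3).length + 2 = (ps3.length + 2) + 1 := by simp
        simp [List.range_succ_eq_map, Function.comp_def]
      rw [hr, List.foldl_cons, List.foldl_map]
      have hstep : (fun (st : List (List String) × List String) (j : Nat) =>
          stepA (k :: k2 :: ks') (p :: p2 :: p3 :: ps3) st (j + 1)) = stepA (k2 :: ks') (p2 :: p3 :: ps3) := by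
        funext st j; exact stepA_succ _ _ _ _ _ _
      have h0 : stepA (k :: k2 :: ks') (p :: p2 :: p3 :: ps3) (its, acc) 0 =
          if k == k2 then (its, acc ++ [p]) else (its ++ [acc ++ [p]], []) := by
        simp [stepA]
      rw [h0, hstep]
      have h' : ps3.length + 2 ≤ (k2 :: ks').length := by simp at h ⊢; omega
      by_cases hk : k == k2
      · rw [if_pos hk, ih (k2 :: ks') p3 p2 h' its (acc ++ [p]), grp]
        simp [hk]
      · rw [if_neg hk, ih (k2 :: ks') p3 p2 h' (its ++ [acc ++ [p]]) [], grp]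
        simp [hk]

def bnds (ks : List String) (n : Nat) : List Nat :=
  ((List.range (n - 1)).filter (fun i => !(ks.getD i "" == ks.getD (i + 1) ""))).map (· + 1)
def segsOf (ps : List String) (cuts : List Nat) : List (List String) :=
  (cuts.zip cuts.tail).map (fun cb => seg ps cb.1 cb.2)

lemma A_norm (ks ps : List String) :
    transform_to_transactions ks ps = ((List.range ps.length).foldl (stepA ks ps) ([], [])).1 := by
  unfold transform_to_transactions
  rw [PySem.List.len_eq, PySem.List.pyRange_one]
  simp only [Int.sub_zero, Int.toNat_natCast, List.foldl_map]
  have hstep : (fun (st : List (List String) × List String) (k : Nat) =>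
      (if (0 : Int) + (k : Int) + 1 = (ps.length : Int) then
        (st.1 ++ [st.2 ++ [PySem.List.pyGetD ps ((0 : Int) + (k : Int)) ""]], st.2 ++ [PySem.List.pyGetD ps ((0 : Int) + (k : Int)) ""])
      else if PySem.List.pyGetD ks ((0 : Int) + (k : Int)) "" == PySem.List.pyGetD ks ((0 : Int) + (k : Int) + 1) "" then
        (st.1, st.2 ++ [PySem.List.pyGetD ps ((0 : Int) + (k : Int)) ""])
      else
        (st.1 ++ [st.2 ++ [PySem.List.pyGetD ps ((0 : Int) + (k : Int)) ""]], ([] : List String)))) = stepA ks ps := by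
    funext st k
    have hi : (0 : Int) + (k : Int) + 1 = ((k + 1 : Nat) : Int) := by push_cast; ring
    rw [hi]
    simp only [zero_add, PySem.List.pyGetD_natCast, Nat.cast_inj, stepA]
  rw [hstep]

lemma consec (c : List Nat) (f : Nat → Nat → List String) :
    (List.range (c.length - 1)).map (fun j => f (c.getD j 0) (c.getD (j + 1) 0)) =
      (c.zip c.tail).map (fun ab => f ab.1 ab.2) := by
  induction c with
  | nil => simp
  | cons a c ih =>
    match c with
    | [] => simp
    | b :: c' =>
      have hr : (a :: b :: c').length - 1 = ((b :: c').length - 1) + 1 := by simp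
      rw [hr, List.range_succ_eq_map]
      simp only [List.map_cons, List.map_map, Function.comp_def, Nat.succ_eq_add_one,
        List.getD_cons_succ, List.getD_cons_zero]
      simp only [List.getD_cons_succ] at ih
      rw [ih]
      simp
lemma getD_map_cast (l : List Nat) (n : Nat) :
    (l.map (fun a : Nat => (a : Int))).getD n 0 = ((l.getD n 0 : Nat) : Int) := by
  simp [List.getD_eq_getElem?_getD]
  cases h : l[n]? <;> simp
lemma seg_eq (ps : List String) (a b : Nat) :
    (PySem.List.pyRange (a : Int) (b : Int) 1).map (fun i => PySem.List.pyGetD ps i "") = seg ps a b := by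
  rw [PySem.List.pyRange_one, List.map_map]
  have h : ((b : Int) - a).toNat = b - a := by omega
  rw [h, seg]
  apply List.map_congr_left
  intro t _
  simp only [Function.comp_def]
  rw [show ((a : Int) + t) = ((a + t : Nat) : Int) by push_cast; ring]
  simp only [PySem.List.pyGetD_natCast, List.getD_eq_getElem?_getD]
lemma B_norm (ks ps : List String) :
    transform_to_transactions_alt ks ps =
      if ps.length = 0 then [] else segsOf ps (0 :: (bnds ks ps.length ++ [ps.length])) := by
  unfold transform_to_transactions_alt
  simp only [PySem.List.len_eq]
  by_cases h0 : ps.length = 0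
  · simp [h0]
  · rw [if_neg h0, if_neg (by exact_mod_cast h0 : ¬ ((ps.length : Int) = 0))]
    have hpx : ∀ x : Nat, (!(PySem.List.pyGetD ks ((x : Int)) "" ==
        PySem.List.pyGetD ks ((x : Int) + 1) "")) = (!(ks.getD x "" == ks.getD (x + 1) "")) := by
      intro x
      rw [show ((x : Int) + 1) = ((x + 1 : Nat) : Int) by push_cast; ring]
      simp only [PySem.List.pyGetD_natCast, List.getD_eq_getElem?_getD]
    have hcuts : ([(0 : Int)] ++ ((PySem.List.pyRange 0 ((ps.length : Int) - 1) 1).filter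
          (fun i => !(PySem.List.pyGetD ks i "" == PySem.List.pyGetD ks (i + 1) ""))).map (· + 1)
        ++ [(ps.length : Int)])
        = (0 :: (bnds ks ps.length ++ [ps.length])).map (fun a : Nat => (a : Int)) := by
      rw [PySem.List.pyRange_one]
      have h1 : ((ps.length : Int) - 1 - 0).toNat = ps.length - 1 := by omega
      rw [h1, List.filter_map, List.map_map, List.map_cons, List.map_append, bnds, List.map_map]
      simp only [Function.comp_def, zero_add, List.cons_append, List.nil_append, List.map_cons,
        List.map_nil]
      congr 1
      congr 1
      rw [List.filter_congr (fun x _ => hpx x)]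
      apply List.map_congr_left
      intro x _
      push_cast
      ring
    rw [hcuts]
    simp only [List.length_map]
    rw [PySem.List.pyRange_one]
    have h2 : ((((0 :: (bnds ks ps.length ++ [ps.length])).length : Nat) : Int) - 1 - 0).toNat =
        (0 :: (bnds ks ps.length ++ [ps.length])).length - 1 := by omega
    rw [h2, List.map_map]
    rw [segsOf, ← consec (0 :: (bnds ks ps.length ++ [ps.length])) (seg ps)]
    apply List.map_congr_left
    intro j _
    simp only [Function.comp_def, zero_add]
    rw [show ((j : Int) + 1) = ((j + 1 : Nat) : Int) by push_cast; ring]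
    simp only [PySem.List.pyGetD_natCast, List.getD_eq_getElem?_getD]
    rw [← List.getD_eq_getElem?_getD, ← List.getD_eq_getElem?_getD, getD_map_cast, getD_map_cast,
      seg_eq]
    simp [List.getD_eq_getElem?_getD]

lemma segs_shift (p : String) (ps : List String) (c : List Nat) :
    ((c.map (· + 1)).zip ((c.map (· + 1)).tail)).map (fun cb => seg (p :: ps) cb.1 cb.2) =
      (c.zip c.tail).map (fun cb => seg ps cb.1 cb.2) := by
  rw [show (List.map (fun x => x + 1) c).tail = List.map (fun x => x + 1) c.tail by
    cases c <;> simp, List.zip_map, List.map_map]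
  apply List.map_congr_left
  intro ab _
  simp [seg_succ]

lemma segs_cons_zero (p : String) (ps : List String) (c : List Nat) :
    segsOf (p :: ps) (0 :: (c.map (· + 1))) =
      match segsOf ps (0 :: c) with
      | [] => []
      | g :: gs => (p :: g) :: gs := by
  cases c with
  | nil => simp [segsOf]
  | cons t0 T2 =>
    simp only [segsOf, List.map_cons, List.tail_cons, List.zip_cons_cons]
    rw [seg_zero_succ]
    have h := segs_shift p ps (t0 :: T2)
    simp only [List.map_cons, List.tail_cons] at h
    rw [h]

lemma segs_cons_one (p : String) (ps : List String) (c : List Nat) :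
    segsOf (p :: ps) (0 :: 1 :: (c.map (· + 1))) = [p] :: segsOf ps (0 :: c) := by
  simp only [segsOf, List.zip_cons_cons, List.map_cons, List.tail_cons]
  have h1 : seg (p :: ps) 0 1 = [p] := by
    rw [show (1 : Nat) = 0 + 1 from rfl, seg_zero_succ]
    simp [seg]
  have h := segs_shift p ps (0 :: c)
  simp only [List.map_cons, List.tail_cons] at h
  rw [h1, h]

lemma bnds_cons (k k2 : String) (ks' : List String) (m : Nat) :
    bnds (k :: k2 :: ks') (m + 2) = (if k == k2 then [] else [1]) ++ (bnds (k2 :: ks') (m + 1)).map (· + 1) := by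
  unfold bnds
  have h1 : m + 2 - 1 = m + 1 := rfl
  have h2 : m + 1 - 1 = m := rfl
  rw [h1, h2, List.range_succ_eq_map]
  simp only [List.filter_cons, List.filter_map, List.map_map, Function.comp_def,
    Nat.succ_eq_add_one, List.getD_cons_zero, List.getD_cons_succ]
  by_cases hk : k == k2
  · simp [hk]
  · simp [hk]

lemma segsB : ∀ (ps2 ks : List String) (p2 p : String), ps2.length + 2 ≤ ks.length →
    segsOf (p :: p2 :: ps2) (0 :: (bnds ks (ps2.length + 2) ++ [ps2.length + 2])) =
      grp [] ks (p :: p2 :: ps2) := by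
  intro ps2
  induction ps2 with
  | nil =>
    intro ks p2 p h
    match ks, h with
    | k :: k2 :: ks', _ =>
      by_cases hk : k == k2 <;>
        simp [bnds, segsOf, seg, grp, hk, List.range_succ]
  | cons p3 ps3 ih =>
    intro ks p2 p h
    match ks, h with
    | k :: k2 :: ks', h =>
      have h' : ps3.length + 2 ≤ (k2 :: ks').length := by simp at h ⊢; omega
      have hIH := ih (k2 :: ks') p3 p2 h'
      have hcl : bnds (k :: k2 :: ks') ((p3 :: ps3).length + 2) ++ [(p3 :: ps3).length + 2] =
          (if k == k2 then [] else [1]) ++ (bnds (k2 :: ks') (ps3.length + 2) ++ [ps3.length + 2]).map (· + 1) := by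
        rw [show (p3 :: ps3).length + 2 = (ps3.length + 1) + 2 from rfl, bnds_cons]
        simp [List.map_append, List.append_assoc]
      rw [hcl]
      by_cases hk : k == k2
      · rw [if_pos hk]
        simp only [List.nil_append]
        rw [segs_cons_zero, hIH]
        rw [grp]
        rw [if_pos hk]
        rw [grp_acc (p3 :: ps3) (k2 :: ks') p2 ([] ++ [p])]
        cases grp [] (k2 :: ks') (p2 :: p3 :: ps3) with
        | nil => rfl
        | cons g gs => simp
      · rw [if_neg hk]
        simp only [List.cons_append, List.nil_append]
        rw [segs_cons_one, hIH]
        rw [grp]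
        rw [if_neg hk]
        simp


-- ===== VERDICT (by name: the statement is the Claim_ definition above) =====
theorem transform_to_transactions_spec : Claim_equal_transform_to_transactions := by
  intro ks ps _hdom hpre
  unfold Spec_transform_to_transactions
  rw [A_norm, B_norm]
  match ps, hpre with
  | [], _ => simp
  | [p], _ => simp [stepA, bnds, segsOf, seg, List.range_succ]
  | p :: p2 :: ps2, hpre =>
    have hlen : ps2.length + 2 ≤ ks.length := by
      cases hpre with
      | inl h => simpa using h
      | inr h => simp at h
    rw [if_neg (by simp)]
    have hL := loopA ps2 ks p2 p hlen [] []
    rw [show (p :: p2 :: ps2).length = ps2.length + 2 by simp] at *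
    rw [hL, segsB ps2 ks p2 p hlen]
    simp
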